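-- pv_equiv track=rewrite | github.com/Swastika27/WiFi-password-crack | WordListGen.py | generate_numeric_sequences
-- ===== SOURCE A (Python) =====
-- import itertools
--
-- def generate_numeric_sequences(max_length=1):
--     """Generates simple numeric sequences (e.g., '0', '1', '2'...)."""
--     sequences = ['']  # Include empty string for cases with no prefix/suffix.
--     if max_length == 0:
--         return sequences
--     digits = '0123456789'
--     for length in range(1, max_length + 1):
--         for seq_tuple in itertools.product(digits, repeat=length):
--             sequences.append(''.join(seq_tuple))
--     return sequences
-- ===== SOURCE B (Python) =====
-- def generate_numeric_sequences(max_length=1):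
--     """Generates simple numeric sequences (e.g., '0', '1', '2'...)."""
--     sequences = ['']
--     current = ['']
--     for _ in range(max_length):
--         current = [c + d for c in current for d in '0123456789']
--         sequences.extend(current)
--     return sequences
-- ===== Notes on version B (the rewrite author's own statement) =====
-- stated objective: simpler
-- what changed: B builds each length level incrementally by extending the previous level's strings with one digit, instead of recomputing every length from scratch with itertools.product, and needs no early-return special case.
import Mathlib
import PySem

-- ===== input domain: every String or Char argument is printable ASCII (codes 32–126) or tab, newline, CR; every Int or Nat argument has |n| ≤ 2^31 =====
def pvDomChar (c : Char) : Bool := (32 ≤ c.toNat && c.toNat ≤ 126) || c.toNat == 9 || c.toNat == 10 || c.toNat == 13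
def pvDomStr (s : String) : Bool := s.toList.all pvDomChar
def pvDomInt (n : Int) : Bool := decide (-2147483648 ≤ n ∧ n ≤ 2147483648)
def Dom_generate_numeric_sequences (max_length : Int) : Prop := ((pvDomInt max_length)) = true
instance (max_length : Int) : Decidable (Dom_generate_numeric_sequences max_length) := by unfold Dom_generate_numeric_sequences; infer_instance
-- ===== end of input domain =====

-- B builds each length level by extending the previous level's strings with one digit
-- instead of recomputing every length with itertools.product; same output, return value only.

-- ===== PORT A =====
-- shared constant: the string '0123456789' as its list of characters
def pvDigits : List Char := "0123456789".toList

-- itertools.product('0123456789', repeat=n): all n-tuples in lexicographic order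
-- (leftmost position varies slowest), as lists of chars
def pvProdRep : Nat → List (List Char)
  | 0 => [[]]
  | n + 1 => pvDigits.flatMap (fun d => (pvProdRep n).map (fun t => d :: t))

def generate_numeric_sequences (max_length : Int) : List String :=
  let sequences : List String := [""]
  if max_length == 0 then sequences
  else
    (PySem.List.pyRange 1 (max_length + 1) 1).foldl
      (fun seqs len =>
        (pvProdRep len.toNat).foldl (fun s t => s ++ [String.ofList t]) seqs)
      sequences

-- ===== PORT B =====
def generate_numeric_sequences_alt (max_length : Int) : List String :=
  let st :=
    (PySem.List.pyRange 0 max_length 1).foldl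
      (fun (p : List String × List String) _ =>
        let current := p.2.flatMap (fun c => pvDigits.map (fun d => c.push d))
        (p.1 ++ current, current))
      ([""], [""])
  st.1

-- ===== PRECONDITION & SPEC =====
def Spec_generate_numeric_sequences (max_length : Int) (out : List String) : Prop := out = generate_numeric_sequences_alt max_length
instance (max_length : Int) (out : List String) : Decidable (Spec_generate_numeric_sequences max_length out) := by unfold Spec_generate_numeric_sequences; infer_instance

-- ===== CLAIM (what is proved, stated in full; the proofs are below) =====
def Claim_equal_generate_numeric_sequences : Prop := ∀ (max_length : Int), Dom_generate_numeric_sequences max_length → Spec_generate_numeric_sequences max_length (generate_numeric_sequences max_length)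

-- ===== LEMMAS AND PROOFS =====

-- the strings of length k, in order
def pvLvl (k : Nat) : List String := (pvProdRep k).map String.ofList

-- cumulative output after processing lengths 1..n
def pvCum : Nat → List String
  | 0 => [""]
  | n + 1 => pvCum n ++ pvLvl (n + 1)

-- B's one-step extension
def pvStep (cur : List String) : List String :=
  cur.flatMap (fun c => pvDigits.map (fun d => c.push d))

-- snoc characterization of the product: extend on the right instead of the left
theorem pvProdRep_snoc (n : Nat) :
    pvProdRep (n + 1) = (pvProdRep n).flatMap (fun t => pvDigits.map (fun d => t ++ [d])) := by
  induction n with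
  | zero => decide
  | succ n ih =>
    show pvDigits.flatMap (fun d => (pvProdRep (n + 1)).map (fun t => d :: t)) = _
    conv_lhs => rw [ih]
    conv_rhs =>
      rw [show pvProdRep (n + 1)
            = pvDigits.flatMap (fun d => (pvProdRep n).map (fun t => d :: t)) from rfl]
    simp [List.flatMap_assoc, List.map_flatMap, List.flatMap_map, List.map_map, Function.comp_def]

theorem pvStep_lvl (k : Nat) : pvStep (pvLvl k) = pvLvl (k + 1) := by
  rw [pvLvl, pvLvl, pvProdRep_snoc]
  simp only [pvStep, List.flatMap_map, List.map_flatMap, List.map_map, Function.comp_def]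
  refine List.flatMap_congr (fun t _ => ?_)
  refine List.map_congr_left (fun d _ => ?_)
  apply String.toList_inj.mp
  simp

-- A's inner append-one-by-one loop is an append of the mapped level
theorem pvInnerA (l : List (List Char)) (seqs : List String) :
    l.foldl (fun s t => s ++ [String.ofList t]) seqs = seqs ++ l.map String.ofList := by
  induction l generalizing seqs with
  | nil => simp
  | cons t l ih => simp [List.foldl_cons, ih, List.append_assoc]

-- A's outer loop over lengths 1..n yields the cumulative output
theorem pvFoldA (n : Nat) :
    (PySem.List.pyRange 1 ((n : Int) + 1) 1).foldl
      (fun seqs len => (pvProdRep len.toNat).foldl (fun s t => s ++ [String.ofList t]) seqs)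
      [""] = pvCum n := by
  induction n with
  | zero => simp [PySem.List.pyRange_one_eq_nil, pvCum]
  | succ n ih =>
    have hc : ((n + 1 : Nat) : Int) + 1 = ((n : Int) + 1) + 1 := by push_cast; ring
    rw [hc,
      PySem.List.pyRange_one_succ_right (by exact_mod_cast Nat.succ_le_succ (Nat.zero_le n)),
      List.foldl_append, ih]
    simp only [List.foldl_cons, List.foldl_nil, pvInnerA]
    have : ((n : Int) + 1).toNat = n + 1 := by omega
    rw [this]
    rfl

-- B's loop invariant: after n iterations the state is (cumulative output, level n)
theorem pvFoldB (n : Nat) :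
    (PySem.List.pyRange 0 (n : Int) 1).foldl
      (fun (p : List String × List String) _ =>
        (p.1 ++ p.2.flatMap (fun c => pvDigits.map (fun d => c.push d)),
         p.2.flatMap (fun c => pvDigits.map (fun d => c.push d))))
      ([""], [""]) = (pvCum n, pvLvl n) := by
  induction n with
  | zero =>
    simp [PySem.List.pyRange_one_eq_nil, pvCum, pvLvl, pvProdRep]
  | succ n ih =>
    have hc : ((n + 1 : Nat) : Int) = (n : Int) + 1 := by push_cast; ring
    rw [hc, PySem.List.pyRange_one_succ_right (by exact_mod_cast Nat.zero_le n),
      List.foldl_append, ih]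
    simp only [List.foldl_cons, List.foldl_nil]
    have hstep : (pvLvl n).flatMap (fun c => pvDigits.map (fun d => c.push d)) = pvLvl (n + 1) :=
      pvStep_lvl n
    rw [hstep]
    rfl

theorem generate_numeric_sequences_eq (m : Int) :
    generate_numeric_sequences m = generate_numeric_sequences_alt m := by
  unfold generate_numeric_sequences generate_numeric_sequences_alt
  by_cases hneg : m ≤ 0
  · rcases eq_or_lt_of_le hneg with heq | hlt
    · subst heq; simp [PySem.List.pyRange_one_eq_nil]
    · have h1 : (m == 0) = false := by simp; omega
      rw [h1]
      simp only [Bool.false_eq_true, if_false]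
      rw [PySem.List.pyRange_one_eq_nil (by omega), PySem.List.pyRange_one_eq_nil (by omega)]
      rfl
  · push Not at hneg
    have h1 : (m == 0) = false := by simp; omega
    rw [h1]
    simp only [Bool.false_eq_true, if_false]
    obtain ⟨n, hn⟩ : ∃ n : Nat, m = (n : Int) := ⟨m.toNat, by omega⟩
    subst hn
    rw [pvFoldA n]
    have hB := pvFoldB n
    simp only at hB ⊢
    rw [hB]

-- ===== VERDICT (by name: the statement is the Claim_ definition above) =====
theorem generate_numeric_sequences_spec : Claim_equal_generate_numeric_sequences := by
  intro m _
  unfold Spec_generate_numeric_sequences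
  exact generate_numeric_sequences_eq m
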